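-- pv_equiv track=rewrite | github.com/prabhat-gp/GFG | Strings/Strings Easy/13_min_indx_char.py | minIndexChar
-- ===== SOURCE A (Python) =====
-- def minIndexChar(str, pat):
--     map = {}
--     a = len(str)
--     b = len(pat)
--
--     for i in range(b):
--         map[pat[i]] = i
--
--     for i in range(a):
--         if str[i] in map:
--             return i
--
--     return -1
-- ===== SOURCE B (Python) =====
-- def minIndexChar(str, pat):
--     best = -1
--     for c in pat:
--         i = str.find(c)
--         if i != -1 and (best == -1 or i < best):
--             best = i
--     return best
-- ===== Notes on version B (the rewrite author's own statement) =====
-- stated objective: alternative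
-- what changed: B iterates over pat instead of str: for each pat character it takes str.find(c) and keeps the minimum index found (-1 if none), replacing A's dict-of-pat plus scan of str.
import Mathlib
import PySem

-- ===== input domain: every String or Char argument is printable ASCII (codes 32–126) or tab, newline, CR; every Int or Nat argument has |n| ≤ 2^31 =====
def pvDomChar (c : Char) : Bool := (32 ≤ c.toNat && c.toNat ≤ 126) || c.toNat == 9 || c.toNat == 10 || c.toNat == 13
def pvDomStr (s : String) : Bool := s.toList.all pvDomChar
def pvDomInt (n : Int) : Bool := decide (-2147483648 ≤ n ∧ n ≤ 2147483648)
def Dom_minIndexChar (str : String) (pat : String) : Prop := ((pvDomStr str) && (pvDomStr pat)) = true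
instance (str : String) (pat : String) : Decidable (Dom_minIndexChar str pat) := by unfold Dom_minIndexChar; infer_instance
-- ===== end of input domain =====

-- B iterates over pat instead of str: for each pat character it takes str.find(c)
-- and keeps the minimum found index (-1 if none). Alternative decomposition, same result.

-- ===== PORT A =====
-- 'for i in range(a): if str[i] in map: return i / return -1' as a structural scan carrying the index
def minIndexCharScan (m : PySem.Dict Char Int) : List Char → Int → Int
  | [], _ => -1
  | c :: rest, i => if m.contains c then i else minIndexCharScan m rest (i + 1)

def minIndexChar (str : String) (pat : String) : Int :=
  -- map = {}; for i in range(b): map[pat[i]] = i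
  let m : PySem.Dict Char Int :=
    (PySem.List.enumerate pat.toList 0).foldl (fun d p => d.insert p.2 p.1) PySem.Dict.empty
  minIndexCharScan m str.toList 0

-- ===== PORT B =====
def minIndexChar_alt (str : String) (pat : String) : Int :=
  pat.toList.foldl
    (fun best c =>
      let i := PySem.Str.find str (String.ofList [c])
      if i ≠ -1 ∧ (best = -1 ∨ i < best) then i else best)
    (-1)

-- ===== PRECONDITION & SPEC =====
def Spec_minIndexChar (str : String) (pat : String) (out : Int) : Prop := out = minIndexChar_alt str pat
instance (str : String) (pat : String) (out : Int) : Decidable (Spec_minIndexChar str pat out) := by unfold Spec_minIndexChar; infer_instance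

-- ===== CLAIM (what is proved, stated in full; the proofs are below) =====
def Claim_equal_minIndexChar : Prop := ∀ (str : String) (pat : String), Dom_minIndexChar str pat → Spec_minIndexChar str pat (minIndexChar str pat)

-- ===== LEMMAS AND PROOFS =====

-- reference: index (as Option Nat) of the first char of s satisfying p
def fio (p : Char → Bool) : List Char → Option Nat
  | [] => none
  | c :: rest => if p c then some 0 else (fio p rest).map (· + 1)

-- reference: Python-style first index, -1 if none
def fi (p : Char → Bool) (s : List Char) : Int :=
  match fio p s with
  | some j => (j : Int)
  | none => -1

theorem fio_congr (p q : Char → Bool) (h : ∀ c, p c = q c) (s : List Char) :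
    fio p s = fio q s := by
  have : p = q := funext h
  subst this; rfl

theorem fio_eq_none_iff (p : Char → Bool) (s : List Char) :
    fio p s = none ↔ ∀ c ∈ s, p c = false := by
  induction s with
  | nil => simp [fio]
  | cons c rest ih =>
    by_cases h : p c = true
    · simp [fio, h]
    · simp only [Bool.not_eq_true] at h
      simp [fio, h, ih]

-- the A-side scan computes fi with an offset
theorem scan_eq_fio (m : PySem.Dict Char Int) (l : List Char) (i : Int) :
    minIndexCharScan m l i =
      (match fio (fun c => m.contains c) l with
       | some j => i + (j : Int)
       | none => -1) := by
  induction l generalizing i with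
  | nil => simp [minIndexCharScan, fio]
  | cons c rest ih =>
    by_cases h : m.contains c = true
    · simp [minIndexCharScan, fio, h]
    · simp only [Bool.not_eq_true] at h
      rw [minIndexCharScan, ih]
      simp only [fio, h, Bool.false_eq_true, if_false]
      cases hf : fio (fun c => m.contains c) rest
      · simp
      · simp only [Option.map_some]
        push_cast
        ring

-- the dict A builds from pat answers membership in pat
theorem contains_buildA (pat : List Char) (c : Char) :
    ((PySem.List.enumerate pat 0).foldl (fun d p => d.insert p.2 p.1)
      (PySem.Dict.empty : PySem.Dict Char Int)).contains c = decide (c ∈ pat) := by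
  have hkeys :
      ((PySem.List.enumerate pat 0).foldl (fun d p => d.insert p.2 p.1)
        (PySem.Dict.empty : PySem.Dict Char Int)).keys
        = PySem.Set.update (PySem.Dict.empty : PySem.Dict Char Int).keys
            ((PySem.List.enumerate pat 0).map (·.2)) :=
    PySem.Dict.keys_foldl_insert_key (PySem.List.enumerate pat 0)
      (fun p : Int × Char => p.2) (fun (_ : PySem.Dict Char Int) (p : Int × Char) => p.1)
      PySem.Dict.empty
  by_cases h : c ∈ pat
  · have : c ∈ ((PySem.List.enumerate pat 0).foldl (fun d p => d.insert p.2 p.1)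
        (PySem.Dict.empty : PySem.Dict Char Int)).keys := by
      rw [hkeys]
      rw [PySem.Set.mem_update]
      right
      simpa [PySem.List.map_snd_enumerate] using h
    simp [h, (PySem.Dict.contains_iff_mem_keys _ _).mpr this]
  · have : c ∉ ((PySem.List.enumerate pat 0).foldl (fun d p => d.insert p.2 p.1)
        (PySem.Dict.empty : PySem.Dict Char Int)).keys := by
      rw [hkeys]
      rw [PySem.Set.mem_update]
      simp [PySem.List.map_snd_enumerate, PySem.Dict.keys_empty, h]
    simp only [h, decide_false]
    by_contra hc
    simp only [Bool.not_eq_false] at hc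
    exact this ((PySem.Dict.contains_iff_mem_keys _ _).mp hc)

-- str.find of a single character is the first index of that character
theorem find_singleton (s : List Char) (c : Char) :
    PySem.Chars.find s [c] = fi (· == c) s := by
  by_cases h : c ∈ s
  · -- find returns a nonnegative index; characterize it
    have hinf : [c] <:+: s := by
      obtain ⟨pre, suf, rfl⟩ := List.append_of_mem h
      exact ⟨pre, suf, by simp⟩
    have hne : PySem.Chars.find s [c] ≠ -1 := (PySem.Chars.find_ne_neg_one_iff s [c]).mpr hinf
    have hnn : 0 ≤ PySem.Chars.find s [c] := by
      have := PySem.Chars.neg_one_le_find s [c]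
      omega
    obtain ⟨hpre, hmin⟩ := PySem.Chars.find_spec hnn
    set k := (PySem.Chars.find s [c]).toNat with hk
    -- singleton prefix of drop j ↔ s[j]? = some c
    have hpref : ∀ j : Nat, ([c] <+: s.drop j) ↔ s[j]? = some c := by
      intro j
      constructor
      · rintro ⟨t, ht⟩
        have : (s.drop j).head? = some c := by rw [← ht]; rfl
        rwa [List.head?_drop] at this
      · intro hj
        have : (s.drop j).head? = some c := by rwa [List.head?_drop]
        cases hd : s.drop j with
        | nil => rw [hd] at this; simp at this
        | cons x t =>
          rw [hd] at this
          simp only [List.head?_cons, Option.some.injEq] at this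
          exact ⟨t, by simp [this]⟩
    have hk_get : s[k]? = some c := (hpref k).mp hpre
    have hk_min : ∀ j < k, s[j]? ≠ some c := fun j hj hc => hmin j hj ((hpref j).mpr hc)
    -- show fio (· == c) s = some k by induction, generalizing
    have key : ∀ (s : List Char) (k : Nat), s[k]? = some c → (∀ j < k, s[j]? ≠ some c) →
        fio (· == c) s = some k := by
      intro s
      induction s with
      | nil => intro k hget _; simp at hget
      | cons x rest ih =>
        intro k hget hlt
        cases k with
        | zero =>
          simp only [List.getElem?_cons_zero, Option.some.injEq] at hget
          simp [fio, hget]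
        | succ k' =>
          have hx : ¬ (x == c) = true := by
            intro hx
            exact hlt 0 (Nat.succ_pos _) (by simp [eq_of_beq hx])
          simp only [List.getElem?_cons_succ] at hget
          have : fio (· == c) rest = some k' := by
            apply ih k' hget
            intro j hj
            have := hlt (j + 1) (by omega)
            simpa using this
          simp [fio, hx, this]
    have : fio (· == c) s = some k := key s k hk_get hk_min
    simp only [fi, this]
    omega
  · have : PySem.Chars.find s [c] = -1 := by
      rw [PySem.Chars.find_eq_neg_one_iff]
      intro hinf
      exact h (hinf.sublist.subset (List.mem_singleton_self c))
    rw [this]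
    have : fio (· == c) s = none := by
      rw [fio_eq_none_iff]
      intro x hx
      simp only [beq_eq_false_iff_ne, ne_eq]
      rintro rfl; exact h hx
    simp [fi, this]

-- minimum over Option Nat
def omin : Option Nat → Option Nat → Option Nat
  | none, b => b
  | a, none => a
  | some x, some y => some (min x y)

theorem fio_or (p q : Char → Bool) (s : List Char) :
    fio (fun x => p x || q x) s = omin (fio p s) (fio q s) := by
  induction s with
  | nil => simp [fio, omin]
  | cons c rest ih =>
    by_cases hp : p c = true <;> by_cases hq : q c = true <;>
      simp only [Bool.not_eq_true] at * <;>
      simp only [fio, hp, hq, Bool.true_or, Bool.or_true, Bool.false_or, if_true, if_false,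
        Bool.false_eq_true] <;> try rfl
    · cases fio q rest <;> simp [omin]
    · cases fio p rest <;> simp [omin]
    · rw [ih]
      cases fio p rest <;> cases fio q rest <;> simp [omin, Nat.min_def] <;> split <;> omega

-- the B step merges one more character into the running minimum
theorem step_merge (p : Char → Bool) (c : Char) (s : List Char) :
    (if fi (· == c) s ≠ -1 ∧ (fi p s = -1 ∨ fi (· == c) s < fi p s)
       then fi (· == c) s else fi p s)
      = fi (fun x => p x || x == c) s := by
  rw [fi, fi, fi, fio_or]
  cases hp : fio p s <;> cases hq : fio (· == c) s <;>
    simp [omin, Nat.min_def] <;> try split <;> omega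

-- the B fold over a list of chars computes fi of the disjunction
theorem foldB (s : List Char) (cs : List Char) (p : Char → Bool) :
    cs.foldl
      (fun best c =>
        if PySem.Chars.find s [c] ≠ -1 ∧ (best = -1 ∨ PySem.Chars.find s [c] < best)
          then PySem.Chars.find s [c] else best)
      (fi p s)
      = fi (fun x => p x || decide (x ∈ cs)) s := by
  induction cs generalizing p with
  | nil =>
    simp only [List.foldl_nil]
    rw [fi, fi, fio_congr p (fun x => p x || decide (x ∈ ([] : List Char)))
      (fun c => by simp)]
  | cons c cs ih =>
    simp only [List.foldl_cons]
    rw [find_singleton, step_merge, ih]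
    have hfun : ∀ x, ((p x || x == c) || decide (x ∈ cs)) = (p x || decide (x ∈ c :: cs)) := by
      intro x
      by_cases hx : x = c
      · subst hx; simp
      · have hb : (x == c) = false := by simp [hx]
        simp [hb, hx]
    rw [fi, fi, fio_congr (fun x => (p x || x == c) || decide (x ∈ cs))
      (fun x => p x || decide (x ∈ c :: cs)) hfun]

-- specialization of foldB to the actual initial value -1
theorem foldB_neg_one (s : List Char) (cs : List Char) :
    cs.foldl
      (fun best c =>
        if PySem.Chars.find s [c] ≠ -1 ∧ (best = -1 ∨ PySem.Chars.find s [c] < best)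
          then PySem.Chars.find s [c] else best)
      (-1)
      = fi (fun x => decide (x ∈ cs)) s := by
  have h := foldB s cs (fun _ => false)
  have hfi : fi (fun _ : Char => false) s = -1 := by
    rw [fi, (fio_eq_none_iff _ _).mpr (fun _ _ => rfl)]
  rw [hfi] at h
  rw [h, fi, fi, fio_congr (fun x : Char => false || decide (x ∈ cs))
    (fun x => decide (x ∈ cs)) (fun x => by simp)]

-- ===== VERDICT (by name: the statement is the Claim_ definition above) =====
theorem minIndexChar_spec : Claim_equal_minIndexChar := by
  intro str pat _
  unfold Spec_minIndexChar minIndexChar minIndexChar_alt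
  simp only [PySem.Str.find_eq, String.toList_ofList]
  rw [scan_eq_fio,
      fio_congr (fun c =>
        ((PySem.List.enumerate pat.toList 0).foldl (fun d p => d.insert p.2 p.1)
          (PySem.Dict.empty : PySem.Dict Char Int)).contains c)
        (fun c => decide (c ∈ pat.toList)) (contains_buildA pat.toList),
      foldB_neg_one]
  cases h : fio (fun c => decide (c ∈ pat.toList)) str.toList <;> simp [fi, h]
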